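-- pv_equiv track=rewrite | github.com/arksch/zwitscher | zwitscher/features.py | number_of_tokens
-- ===== SOURCE A (Python) =====
-- def chunk_connective(nested_connective_positions):
--     """ Helper to chunk a connective into its continuous parts
--
--     :param nested_connective_positions: list of pairs of (sent_index, token_index)
--     :type nested_connective_positions: list
--     :return: list of chunks, each chunk is a list of pairs of (sent_index, token_index)
--     :rtype: list
--     """
--     chunks = []
--     current_chunk = []
--     nested_connective_positions = sorted(nested_connective_positions)
--     for i in range(0, len(nested_connective_positions)):
--         # Finding all the words in the sentence and
--         if not current_chunk:
--             current_chunk.append(nested_connective_positions[i])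
--         else:
--             if nested_connective_positions[i - 1][0] != nested_connective_positions[i][0]:
--                 # Crossed sentence boundary
--                 chunks.append(current_chunk)
--                 current_chunk = [nested_connective_positions[i]]
--             else:
--                 if nested_connective_positions[i - 1][1] + 1 != nested_connective_positions[i][1]:
--                     # Skipped words
--                     chunks.append(current_chunk)
--                     current_chunk = [nested_connective_positions[i]]
--                 else:
--                     # We are continuing our connective
--                     current_chunk.append(nested_connective_positions[i])
--     chunks.append(current_chunk)
--     return chunks
--
-- def number_of_tokens(sents, nested_connective_positions, direction='before'):
--     """ Feature function
--
--     Counting tokens inside sentences before/after/between connectives. 'between' is 0 for continuous connectives.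
--     :param sents:
--     :type sents:
--     :param nested_connective_positions:
--     :type nested_connective_positions:
--     :param direction:
--     :type direction:
--     :return:
--     :rtype: int
--     """
--     nested_connective_positions = sorted(nested_connective_positions)
--     if direction == 'before':
--         sent, tok = nested_connective_positions[0]
--         return tok
--     if direction == 'after':
--         sent, tok = nested_connective_positions[-1]
--         return len(sents[sent]) - tok - 1
--     if direction == 'between':
--         chunks = chunk_connective(nested_connective_positions)
--         if len(chunks) == 0:
--             return None  # Missing value
--         elif len(chunks) == 1:
--             return 0
--         elif len(chunks) == 2:
--             # The left boundary of the gap is the last token of the first chunk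
--             # The right boundary of the gap is the first token of the last chunk
--             left = chunks[0][-1]
--             right = chunks[-1][0]
--             if left[0] == right[0]:
--                 # The chunks are in the same sentence
--                 return right[1] - left[1] - 1
--             else:
--                 return (number_of_tokens(sents, [left], direction='after') +  # Tokens from the left sentence
--                         number_of_tokens(sents, [right], direction='before') +  # Tokens from the right sentence
--                         sum([len(sents[i]) for i in range(left[0] + 1, right[0])]))  # Tokens from sentences inbetween
--         else:
--             return None
-- ===== SOURCE B (Python) =====
-- def number_of_tokens(sents, nested_connective_positions, direction='before'):
--     ps = sorted(nested_connective_positions)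
--     if direction == 'before':
--         return ps[0][1]
--     if direction == 'after':
--         sent, tok = ps[-1]
--         return len(sents[sent]) - tok - 1
--     if direction == 'between':
--         # gap scan over consecutive sorted positions instead of building chunk lists
--         gaps = [(p, q) for p, q in zip(ps, ps[1:])
--                 if p[0] != q[0] or p[1] + 1 != q[1]]
--         if not gaps:
--             return 0
--         if len(gaps) == 1:
--             (ls, lt), (rs, rt) = gaps[0]
--             if ls == rs:
--                 return rt - lt - 1
--             return (len(sents[ls]) - lt - 1) + rt + sum(len(sents[i]) for i in range(ls + 1, rs))
--         return None
--     return None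
-- ===== Notes on version B (the rewrite author's own statement) =====
-- stated objective: simpler
-- what changed: Replaces the chunk_connective helper (which materialises the list of contiguous chunks) and the two recursive self-calls by a single scan of consecutive sorted positions that collects the gap pairs directly and computes the between-count inline.
import Mathlib
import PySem

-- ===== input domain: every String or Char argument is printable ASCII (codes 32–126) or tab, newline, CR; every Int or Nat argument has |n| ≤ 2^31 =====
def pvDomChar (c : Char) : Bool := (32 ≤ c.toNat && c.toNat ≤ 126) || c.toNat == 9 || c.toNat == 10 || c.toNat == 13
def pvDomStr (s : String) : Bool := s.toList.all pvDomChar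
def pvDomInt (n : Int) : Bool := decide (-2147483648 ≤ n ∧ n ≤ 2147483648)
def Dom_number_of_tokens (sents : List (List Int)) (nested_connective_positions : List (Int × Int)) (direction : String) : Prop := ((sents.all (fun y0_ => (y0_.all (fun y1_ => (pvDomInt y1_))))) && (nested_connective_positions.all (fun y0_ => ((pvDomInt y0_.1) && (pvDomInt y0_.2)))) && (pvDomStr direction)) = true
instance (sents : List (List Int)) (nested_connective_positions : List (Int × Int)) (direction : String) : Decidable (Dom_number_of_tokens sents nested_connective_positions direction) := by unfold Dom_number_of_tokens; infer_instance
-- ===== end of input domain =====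

-- B replaces A's chunk-list construction and recursive self-calls by one gap scan over
-- consecutive sorted positions (objective: simpler).

-- ===== PORT A =====
-- loop body of the 'for i in range(0, len(...))' loop of chunk_connective
def chunkBody (ps : List (Int × Int)) (acc : List (List (Int × Int)) × List (Int × Int)) (i : Int) :
    List (List (Int × Int)) × List (Int × Int) :=
  let pi := PySem.List.pyGetD ps i ((0 : Int), (0 : Int))
  let pim := PySem.List.pyGetD ps (i - 1) ((0 : Int), (0 : Int))
  if acc.2.isEmpty then (acc.1, acc.2 ++ [pi])
  else if pim.1 ≠ pi.1 then (acc.1 ++ [acc.2], [pi])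
  else if pim.2 + 1 ≠ pi.2 then (acc.1 ++ [acc.2], [pi])
  else (acc.1, acc.2 ++ [pi])

def chunk_connective (nested_connective_positions : List (Int × Int)) : List (List (Int × Int)) :=
  let ps := PySem.List.sorted2 nested_connective_positions Prod.fst Prod.snd
  let st := (PySem.List.pyRange 0 (ps.length : Int) 1).foldl (chunkBody ps) ([], [])
  st.1 ++ [st.2]

def number_of_tokens (sents : List (List Int)) (nested_connective_positions : List (Int × Int)) (direction : String) : Option Int :=
  let ps := PySem.List.sorted2 nested_connective_positions Prod.fst Prod.snd
  if direction = "before" then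
    some (PySem.List.pyGetD ps 0 ((0 : Int), (0 : Int))).2
  else if direction = "after" then
    let st := PySem.List.pyGetD ps (-1) ((0 : Int), (0 : Int))
    some (((PySem.List.pyGetD sents st.1 []).length : Int) - st.2 - 1)
  else if _h : direction = "between" then
    -- chunk_connective re-sorts its argument itself, so passing the original list is exact
    -- (in Python sorted(sorted(l)) = sorted(l))
    let chunks := chunk_connective nested_connective_positions
    if chunks.length = 0 then none
    else if chunks.length = 1 then some 0
    else if chunks.length = 2 then
      let left := PySem.List.pyGetD (PySem.List.pyGetD chunks 0 []) (-1) ((0 : Int), (0 : Int))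
      let right := PySem.List.pyGetD (PySem.List.pyGetD chunks (-1) []) 0 ((0 : Int), (0 : Int))
      if left.1 = right.1 then some (right.2 - left.2 - 1)
      else
        -- in Python the two recursive calls always return an int here, hence the .getD 0
        some ((number_of_tokens sents [left] "after").getD 0 +
              (number_of_tokens sents [right] "before").getD 0 +
              ((PySem.List.pyRange (left.1 + 1) right.1 1).map
                (fun i => ((PySem.List.pyGetD sents i []).length : Int))).sum)
    else none
  else none
termination_by (if direction = "between" then 1 else 0)
decreasing_by all_goals simp_all

-- ===== PORT B =====
def pvIsGap (p q : Int × Int) : Bool := p.1 != q.1 || p.2 + 1 != q.2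

-- the gap pairs of the sorted position list: consecutive positions that are not contiguous
def pvGaps (nested : List (Int × Int)) : List ((Int × Int) × (Int × Int)) :=
  let ps := PySem.List.sorted2 nested Prod.fst Prod.snd
  (ps.zip ps.tail).filter (fun pq => pvIsGap pq.1 pq.2)

def number_of_tokens_alt (sents : List (List Int)) (nested_connective_positions : List (Int × Int)) (direction : String) : Option Int :=
  let ps := PySem.List.sorted2 nested_connective_positions Prod.fst Prod.snd
  if direction = "before" then
    some (PySem.List.pyGetD ps 0 ((0 : Int), (0 : Int))).2
  else if direction = "after" then
    let st := PySem.List.pyGetD ps (-1) ((0 : Int), (0 : Int))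
    some (((PySem.List.pyGetD sents st.1 []).length : Int) - st.2 - 1)
  else if direction = "between" then
    match pvGaps nested_connective_positions with
    | [] => some 0
    | [(l, r)] =>
      if l.1 = r.1 then some (r.2 - l.2 - 1)
      else some ((((PySem.List.pyGetD sents l.1 []).length : Int) - l.2 - 1) + r.2 +
                 ((PySem.List.pyRange (l.1 + 1) r.1 1).map
                   (fun i => ((PySem.List.pyGetD sents i []).length : Int))).sum)
    | _ => none
  else none

-- ===== PRECONDITION & SPEC =====
-- in the 'between' cross-sentence one-gap case Python indexes sents at the left sentence and
-- at every sentence inside the gap; this Bool says those indexings do not raise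
def pvBetweenOK (sents : List (List Int)) (nested : List (Int × Int)) : Bool :=
  let g := pvGaps nested
  if g.length = 1 then
    let l := (g.getD 0 (((0 : Int), (0 : Int)), ((0 : Int), (0 : Int)))).1
    let r := (g.getD 0 (((0 : Int), (0 : Int)), ((0 : Int), (0 : Int)))).2
    l.1 == r.1 ||
    (decide (PySem.Raise.InRange sents.length l.1) &&
     (PySem.List.pyRange (l.1 + 1) r.1 1).all (fun i => decide (PySem.Raise.InRange sents.length i)))
  else true

-- Pre_ excludes exactly the inputs where the Python A raises an IndexError: an empty position
-- list for 'before'/'after', an out-of-range sentence index of the last position for 'after',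
-- and out-of-range sentence indexings in the cross-sentence one-gap 'between' case.
def Pre_number_of_tokens (sents : List (List Int)) (nested_connective_positions : List (Int × Int)) (direction : String) : Prop :=
  (direction = "before" → nested_connective_positions ≠ []) ∧
  (direction = "after" → nested_connective_positions ≠ [] ∧
      PySem.Raise.InRange sents.length
        (((PySem.List.sorted2 nested_connective_positions Prod.fst Prod.snd).getLast?.getD ((0 : Int), (0 : Int))).1)) ∧
  (direction = "between" → pvBetweenOK sents nested_connective_positions = true)
instance (sents : List (List Int)) (nested_connective_positions : List (Int × Int)) (direction : String) : Decidable (Pre_number_of_tokens sents nested_connective_positions direction) := by unfold Pre_number_of_tokens; infer_instance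

def pvWitness_number_of_tokens : List (List Int) × (List (Int × Int)) × String := ([[1, 2, 3]], [(0, 1)], "before")

def Spec_number_of_tokens (sents : List (List Int)) (nested_connective_positions : List (Int × Int)) (direction : String) (out : Option Int) : Prop := out = number_of_tokens_alt sents nested_connective_positions direction
instance (sents : List (List Int)) (nested_connective_positions : List (Int × Int)) (direction : String) (out : Option Int) : Decidable (Spec_number_of_tokens sents nested_connective_positions direction out) := by unfold Spec_number_of_tokens; infer_instance

-- ===== CLAIM (what is proved, stated in full; the proofs are below) =====
def Claim_equal_number_of_tokens : Prop := ∀ (sents : List (List Int)) (nested_connective_positions : List (Int × Int)) (direction : String), Dom_number_of_tokens sents nested_connective_positions direction → Pre_number_of_tokens sents nested_connective_positions direction → Spec_number_of_tokens sents nested_connective_positions direction (number_of_tokens sents nested_connective_positions direction)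

-- ===== LEMMAS AND PROOFS =====

-- gap pairs of an explicit list (pvGaps nested = pvGapsOf (sorted2 nested))
def pvGapsOf (l : List (Int × Int)) : List ((Int × Int) × (Int × Int)) :=
  (l.zip l.tail).filter (fun pq => pvIsGap pq.1 pq.2)

-- A's chunk loop re-expressed as structural recursion carrying the previous element
def pvChunkGo (prev : Int × Int) (cur : List (Int × Int)) (chunks : List (List (Int × Int))) :
    List (Int × Int) → List (List (Int × Int)) × List (Int × Int)
  | [] => (chunks, cur)
  | p :: rest =>
    if pvIsGap prev p then pvChunkGo p [p] (chunks ++ [cur]) rest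
    else pvChunkGo p (cur ++ [p]) chunks rest

lemma pvChunkGo_acc (l : List (Int × Int)) : ∀ (prev : Int × Int) (cur : List (Int × Int)) (chunks : List (List (Int × Int))),
    pvChunkGo prev cur chunks l = (chunks ++ (pvChunkGo prev cur [] l).1, (pvChunkGo prev cur [] l).2) := by
  induction l with
  | nil => intro prev cur chunks; simp [pvChunkGo]
  | cons p rest ih =>
    intro prev cur chunks
    by_cases h : pvIsGap prev p
    · simp only [pvChunkGo, h, if_true, List.nil_append]
      rw [ih p [p] (chunks ++ [cur]), ih p [p] [cur]]
      simp
    · have h' : pvIsGap prev p = false := by simpa using h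
      simp only [pvChunkGo, h', Bool.false_eq_true, if_false]
      exact ih p (cur ++ [p]) chunks

lemma chunkBody_step (ps : List (Int × Int)) (k : Nat) (chunks : List (List (Int × Int)))
    (cur : List (Int × Int)) (prev p : Int × Int)
    (hk1 : 1 ≤ k) (hp : ps[k]? = some p) (hprev : ps[k - 1]? = some prev) (hcur : cur ≠ []) :
    chunkBody ps (chunks, cur) (k : Int) =
      if pvIsGap prev p then (chunks ++ [cur], [p]) else (chunks, cur ++ [p]) := by
  have hpi : PySem.List.pyGetD ps (k : Int) ((0 : Int), (0 : Int)) = p := by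
    simp [PySem.List.pyGetD_natCast, List.getD_eq_getElem?_getD, hp]
  have hk' : (k : Int) - 1 = ((k - 1 : Nat) : Int) := by omega
  have hpim : PySem.List.pyGetD ps ((k : Int) - 1) ((0 : Int), (0 : Int)) = prev := by
    rw [hk']
    simp [PySem.List.pyGetD_natCast, List.getD_eq_getElem?_getD, hprev]
  have hce : cur.isEmpty = false := by simp [List.isEmpty_eq_false_iff, hcur]
  simp only [chunkBody, hpi, hpim, hce, Bool.false_eq_true, if_false]
  by_cases h1 : prev.1 = p.1
  · by_cases h2 : prev.2 + 1 = p.2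
    · simp [pvIsGap, h1, h2]
    · simp [pvIsGap, h1, h2]
  · simp [pvIsGap, h1]

lemma chunk_loop_aux (l : List (Int × Int)) : ∀ (ps : List (Int × Int)) (k : Nat)
    (chunks : List (List (Int × Int))) (cur : List (Int × Int)) (prev : Int × Int),
    1 ≤ k → List.drop k ps = l → ps[k - 1]? = some prev → cur ≠ [] →
    (PySem.List.pyRange (k : Int) (ps.length : Int) 1).foldl (chunkBody ps) (chunks, cur) =
      pvChunkGo prev cur chunks l := by
  induction l with
  | nil =>
    intro ps k chunks cur prev hk1 hdrop hprev hcur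
    have hlen : ps.length ≤ k := by
      have := congrArg List.length hdrop
      simp at this
      omega
    rw [PySem.List.pyRange_one_eq_nil (by exact_mod_cast hlen)]
    simp [pvChunkGo]
  | cons p rest ih =>
    intro ps k chunks cur prev hk1 hdrop hprev hcur
    have hlen : (ps.drop k).length = rest.length + 1 := by rw [hdrop]; simp
    have hk : k < ps.length := by
      simp at hlen
      omega
    have hp : ps[k]? = some p := by
      have h0 : (List.drop k ps)[0]? = ps[k + 0]? := List.getElem?_drop
      rw [hdrop] at h0
      simpa using h0.symm
    have hdrop' : List.drop (k + 1) ps = rest := by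
      have h1 : List.drop (k + 1) ps = (List.drop k ps).tail := by
        rw [← List.drop_drop]
        simp
      rw [h1, hdrop]
      rfl
    rw [PySem.List.pyRange_one_cons (by exact_mod_cast hk)]
    rw [List.foldl_cons]
    rw [chunkBody_step ps k chunks cur prev p hk1 hp hprev hcur]
    by_cases hg : pvIsGap prev p
    · simp only [pvChunkGo, hg, if_true]
      have := ih ps (k + 1) (chunks ++ [cur]) [p] p (by omega) hdrop' (by simpa using hp) (by simp)
      rw [← this]
      norm_num
    · have hg' : pvIsGap prev p = false := by simpa using hg
      simp only [pvChunkGo, hg', Bool.false_eq_true, if_false]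
      have := ih ps (k + 1) chunks (cur ++ [p]) p (by omega) hdrop' (by simpa using hp) (by simp)
      rw [← this]
      norm_num

lemma pvGapsOf_cons_cons (prev p : Int × Int) (rest : List (Int × Int)) :
    pvGapsOf (prev :: p :: rest) =
      (if pvIsGap prev p then [(prev, p)] else []) ++ pvGapsOf (p :: rest) := by
  by_cases h : pvIsGap prev p
  · simp [pvGapsOf, h]
  · have h' : pvIsGap prev p = false := by simpa using h
    simp [pvGapsOf, h']

lemma pvChunkGo_char (l : List (Int × Int)) : ∀ (prev : Int × Int) (cur : List (Int × Int)),
    cur ≠ [] → cur.getLast? = some prev →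
    ((pvChunkGo prev cur [] l).1.length = (pvGapsOf (prev :: l)).length) ∧
    (pvChunkGo prev cur [] l).2 ≠ [] ∧
    (pvGapsOf (prev :: l) = [] → (pvChunkGo prev cur [] l).1 = [] ∧ (pvChunkGo prev cur [] l).2 = cur ++ l) ∧
    (∀ a b, (pvGapsOf (prev :: l)).head? = some (a, b) →
      ∃ c1 C, (pvChunkGo prev cur [] l).1 = c1 :: C ∧ c1.getLast? = some a ∧
        ((pvGapsOf (prev :: l)).length = 1 → (pvChunkGo prev cur [] l).2.head? = some b)) := by
  induction l with
  | nil =>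
    intro prev cur hne hlast
    refine ⟨by simp [pvChunkGo, pvGapsOf], by simpa [pvChunkGo] using hne, by simp [pvChunkGo], ?_⟩
    intro a b hh
    simp [pvGapsOf] at hh
  | cons p rest ih =>
    intro prev cur hne hlast
    rw [pvGapsOf_cons_cons]
    by_cases hg : pvIsGap prev p
    · -- a gap between prev and p: close the current chunk
      simp only [pvChunkGo, hg, if_true, List.nil_append]
      rw [pvChunkGo_acc rest p [p] [cur]]
      obtain ⟨ihlen, ihne, ihnil, ihhead⟩ := ih p [p] (by simp) (by simp)
      refine ⟨by simp [ihlen], by simpa using ihne, by simp, ?_⟩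
      intro a b hh
      simp only [List.cons_append, List.nil_append, List.head?_cons, Option.some.injEq,
        Prod.mk.injEq] at hh
      refine ⟨cur, (pvChunkGo p [p] [] rest).1, by simp, by rw [← hh.1]; exact hlast, ?_⟩
      intro hlen1
      simp only [List.cons_append, List.nil_append, List.length_cons] at hlen1
      have h0 : pvGapsOf (p :: rest) = [] := List.eq_nil_of_length_eq_zero (by omega)
      have h2 := (ihnil h0).2
      rw [h2, ← hh.2]
      simp
    · -- no gap: p continues the current chunk
      have hg' : pvIsGap prev p = false := by simpa using hg
      simp only [pvChunkGo, hg', Bool.false_eq_true, if_false, List.nil_append]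
      obtain ⟨ihlen, ihne, ihnil, ihhead⟩ := ih p (cur ++ [p]) (by simp) (by simp)
      refine ⟨ihlen, ihne, ?_, ?_⟩
      · intro h0
        obtain ⟨h1, h2⟩ := ihnil h0
        exact ⟨h1, by rw [h2]; simp⟩
      · intro a b hh
        obtain ⟨c1, C, e1, e2, e3⟩ := ihhead a b hh
        exact ⟨c1, C, e1, e2, e3⟩

lemma pvGaps_eq (nested : List (Int × Int)) :
    pvGaps nested = pvGapsOf (PySem.List.sorted2 nested Prod.fst Prod.snd) := rfl

-- the recursive calls of A on singleton connectives
lemma nt_after_single (sents : List (List Int)) (a : Int × Int) :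
    number_of_tokens sents [a] "after" =
      some (((PySem.List.pyGetD sents a.1 []).length : Int) - a.2 - 1) := by
  rw [number_of_tokens.eq_def]
  have hs : PySem.List.sorted2 [a] Prod.fst Prod.snd = [a] := rfl
  rw [if_neg (by decide : ¬("after" = "before")), if_pos rfl]
  simp [hs, PySem.List.pyGetD_neg_one]

lemma nt_before_single (sents : List (List Int)) (b : Int × Int) :
    number_of_tokens sents [b] "before" = some b.2 := by
  rw [number_of_tokens.eq_def]
  have hs : PySem.List.sorted2 [b] Prod.fst Prod.snd = [b] := rfl
  rw [if_pos rfl]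
  simp [hs, PySem.List.pyGetD_zero]

lemma between_core (sents : List (List Int)) (nested : List (Int × Int)) :
    number_of_tokens sents nested "between" = number_of_tokens_alt sents nested "between" := by
  rw [number_of_tokens.eq_def]
  rw [if_neg (by decide : ¬("between" = "before")), if_neg (by decide : ¬("between" = "after")),
    dif_pos rfl]
  unfold number_of_tokens_alt
  rw [if_neg (by decide : ¬("between" = "before")), if_neg (by decide : ¬("between" = "after")),
    if_pos rfl]
  rw [pvGaps_eq]
  unfold chunk_connective
  cases hps : PySem.List.sorted2 nested Prod.fst Prod.snd with
  | nil =>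
    simp [pvGapsOf]
  | cons p0 rest =>
    -- the first loop iteration starts the current chunk with p0
    simp only []
    have hlen0 : (0 : Int) < ((p0 :: rest).length : Int) := by
      have := Nat.succ_pos rest.length
      simp
    rw [PySem.List.pyRange_one_cons hlen0, List.foldl_cons]
    have hfirst : chunkBody (p0 :: rest) ([], []) 0 = ([], [p0]) := by
      simp [chunkBody, PySem.List.pyGetD_zero_cons]
    rw [hfirst]
    have hloop := chunk_loop_aux rest (p0 :: rest) 1 [] [p0] p0 (by omega) (by simp) (by simp) (by simp)
    norm_num at hloop ⊢
    rw [hloop]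
    obtain ⟨hlen, hne, hnil, hhead⟩ := pvChunkGo_char rest p0 [p0] (by simp) (by simp)
    cases hg : pvGapsOf (p0 :: rest) with
    | nil =>
      obtain ⟨h1, _⟩ := hnil hg
      simp [h1]
    | cons g1 gs =>
      obtain ⟨a, b⟩ := g1
      obtain ⟨c1, C, e1, e2, e3⟩ := hhead a b (by rw [hg]; rfl)
      cases gs with
      | nil =>
        -- exactly one gap
        have hC : C = [] := by
          have h1 : (pvChunkGo p0 [p0] [] rest).1.length = 1 := by rw [hlen, hg]; rfl
          rw [e1] at h1
          simpa using h1
        subst hC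
        have hb : (pvChunkGo p0 [p0] [] rest).2.head? = some b := e3 (by rw [hg]; rfl)
        rw [e1]
        have hc1ne : c1 ≠ [] := by
          intro h
          rw [h] at e2
          simp at e2
        have hleft : PySem.List.pyGetD c1 (-1) ((0 : Int), (0 : Int)) = a := by
          rw [PySem.List.pyGetD_neg_one c1 ((0 : Int), (0 : Int)) hc1ne]
          rw [List.getLast?_eq_some_getLast hc1ne] at e2
          exact Option.some.inj e2
        have hright : PySem.List.pyGetD (pvChunkGo p0 [p0] [] rest).2 0 ((0 : Int), (0 : Int)) = b := by
          cases hS : (pvChunkGo p0 [p0] [] rest).2 with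
          | nil => exact absurd hS hne
          | cons x t =>
            rw [hS] at hb
            simp only [List.head?_cons, Option.some.injEq] at hb
            rw [PySem.List.pyGetD_zero_cons, hb]
        norm_num
        rw [hleft, hright]
        by_cases hss : a.1 = b.1
        · simp [hss]
        · simp only [hss, if_false]
          rw [nt_after_single, nt_before_single]
          simp
      | cons g2 gs2 =>
        -- two or more gaps: both sides return none
        rw [if_neg (by rw [e1]; simp), if_neg (by rw [hlen, hg]; simp)]

-- ===== VERDICT (by name: the statement is the Claim_ definition above) =====
theorem number_of_tokens_spec : Claim_equal_number_of_tokens := by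
  intro sents nested direction _ _
  unfold Spec_number_of_tokens
  by_cases h1 : direction = "before"
  · subst h1
    rw [number_of_tokens.eq_def]
    unfold number_of_tokens_alt
    rw [if_pos rfl, if_pos rfl]
  · by_cases h2 : direction = "after"
    · subst h2
      rw [number_of_tokens.eq_def]
      unfold number_of_tokens_alt
      rw [if_neg (by decide : ¬("after" = "before")), if_pos rfl,
        if_neg (by decide : ¬("after" = "before")), if_pos rfl]
    · by_cases h3 : direction = "between"
      · subst h3
        exact between_core sents nested
      · rw [number_of_tokens.eq_def]
        unfold number_of_tokens_alt
        rw [if_neg h1, if_neg h2, dif_neg h3, if_neg h1, if_neg h2, if_neg h3]
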